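-- pv_equiv track=rewrite | github.com/wanshoupu/quantum-simulations | quompiler/utils/gray.py | diff_parity_bits
-- ===== SOURCE A (Python) =====
-- from typing import Tuple, List
--
-- def diff_parity_bits(ns: Tuple[int, int], ms: Tuple[int, int]) -> Tuple[List[int], List[int]]:
--     """
--     Parity bit indexes are those where the numbers in each group have differing bit at this index.
--     For example, ns = (5,6), ms = (7,0), the parity bits are [0,1] because if written in binary
--     5: 101
--     6: 110
--     7: 111
--     0: 000
--     Note we adopt the Little endian convention the least significant bit has index zero.
--     :param ns:
--     :param ms:
--     :return: The indexes of the parity bits. If no such bit exists, return empty list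
--     """
--     bitlength = max(ns + ms).bit_length()
--     parity = []
--     diffs = []
--     for i in range(bitlength):
--         mask = 1 << i
--         if len({ns[0] & mask, ns[1] & mask}) > 1 and len({ms[0] & mask, ms[1] & mask}) > 1:
--             parity.append(i)
--         if len({ns[0] & mask, ns[1] & mask, ms[0] & mask, ms[1] & mask}) > 1:
--             diffs.append(i)
--     return diffs, parity
-- ===== SOURCE B (Python) =====
-- from typing import Tuple, List
--
--
-- def _bit_indices(mask: int) -> List[int]:
--     """Indices of the set bits of a non-negative mask, ascending."""
--     out = []
--     i = 0
--     while mask: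
--         if mask & 1:
--             out.append(i)
--         mask >>= 1
--         i += 1
--     return out
--
--
-- def diff_parity_bits(ns: Tuple[int, int], ms: Tuple[int, int]) -> Tuple[List[int], List[int]]:
--     a, b = ns
--     c, d = ms
--     bitlength = max(ns + ms).bit_length()
--     lim = (1 << bitlength) - 1  # only the first `bitlength` bits are examined
--     parity_mask = (a ^ b) & (c ^ d) & lim
--     diff_mask = ((a | b | c | d) ^ (a & b & c & d)) & lim
--     return _bit_indices(diff_mask), _bit_indices(parity_mask)
-- ===== Notes on version B (the rewrite author's own statement) =====
-- stated objective: alternative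
-- what changed: B replaces A's per-bit loop with set-cardinality tests by whole-integer bit arithmetic: it builds a parity mask ((a^b)&(c^d)) and a difference mask ((a|b|c|d)^(a&b&c&d)), truncates both to the examined bit width, and reads the ascending bit indices off each mask with a single shift-right walk.
import Mathlib
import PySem

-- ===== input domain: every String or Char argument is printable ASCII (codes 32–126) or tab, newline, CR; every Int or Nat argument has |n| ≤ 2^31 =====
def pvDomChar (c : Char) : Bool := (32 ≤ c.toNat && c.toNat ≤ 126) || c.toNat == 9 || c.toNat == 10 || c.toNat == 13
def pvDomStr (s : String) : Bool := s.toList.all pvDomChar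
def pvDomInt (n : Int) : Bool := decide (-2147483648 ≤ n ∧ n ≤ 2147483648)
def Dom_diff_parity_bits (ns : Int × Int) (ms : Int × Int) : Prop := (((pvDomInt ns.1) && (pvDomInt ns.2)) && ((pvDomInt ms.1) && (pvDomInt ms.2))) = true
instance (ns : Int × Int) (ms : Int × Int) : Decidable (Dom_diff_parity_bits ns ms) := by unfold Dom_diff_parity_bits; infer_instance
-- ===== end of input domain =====

-- B replaces A's per-bit set-cardinality scan by whole-integer bit arithmetic (three masks) plus a
-- set-bit walk of each mask (objective: alternative algorithm, similar cost).

-- ===== PORT A =====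
-- Literal port of Source A: loop i over range(bitlength), test set cardinalities, append.
def diff_parity_bits (ns : Int × Int) (ms : Int × Int) : List Int × List Int :=
  let bitlength : Nat := PySem.Int.bitLength (max (max ns.1 ns.2) (max ms.1 ms.2))
  let st :=
    (PySem.List.pyRange 0 (bitlength : Int)).foldl
      (fun (st : List Int × List Int) i =>
        let mask : Int := 1 <<< i.toNat   -- i runs over 0..bitlength-1, so `.toNat` is exact here
        ( if 1 < (PySem.Set.ofList [PySem.Int.band ns.1 mask, PySem.Int.band ns.2 mask]).length
             ∧ 1 < (PySem.Set.ofList [PySem.Int.band ms.1 mask, PySem.Int.band ms.2 mask]).length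
          then st.1 ++ [i] else st.1,
          if 1 < (PySem.Set.ofList [PySem.Int.band ns.1 mask, PySem.Int.band ns.2 mask,
                                    PySem.Int.band ms.1 mask, PySem.Int.band ms.2 mask]).length
          then st.2 ++ [i] else st.2))
      ([], [])
  (st.2, st.1)

-- ===== PORT B =====
-- _bit_indices of Source B; its Python argument is always a non-negative int, modelled as Nat (exact).
-- The `fuel` argument only bounds the loop (mask strictly halves each turn, so `fuel = mask` is
-- always enough); it makes the recursion structural and does not change the computed value.
def pvBitIndicesFuel : Nat → Nat → Int → List Int
  | 0, _, _ => []
  | fuel + 1, mask, i =>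
      if mask = 0 then []
      else (if mask &&& 1 = 1 then [i] else []) ++ pvBitIndicesFuel fuel (mask >>> 1) (i + 1)

def pvBitIndices (mask : Nat) (i : Int) : List Int := pvBitIndicesFuel mask mask i

def diff_parity_bits_alt (ns : Int × Int) (ms : Int × Int) : List Int × List Int :=
  let a := ns.1
  let b := ns.2
  let c := ms.1
  let d := ms.2
  let bitlength : Nat := PySem.Int.bitLength (max (max a b) (max c d))
  let lim : Int := (1 <<< bitlength) - 1
  let parity_mask := PySem.Int.band (PySem.Int.band (PySem.Int.bxor a b) (PySem.Int.bxor c d)) lim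
  let diff_mask := PySem.Int.band
      (PySem.Int.bxor (PySem.Int.bor (PySem.Int.bor (PySem.Int.bor a b) c) d)
                      (PySem.Int.band (PySem.Int.band (PySem.Int.band a b) c) d)) lim
  -- both masks were just anded with lim ≥ 0, hence are ≥ 0: `.toNat` is exact
  (pvBitIndices diff_mask.toNat 0, pvBitIndices parity_mask.toNat 0)

-- ===== PRECONDITION & SPEC =====
def Spec_diff_parity_bits (ns : Int × Int) (ms : Int × Int) (out : List Int × List Int) : Prop := out = diff_parity_bits_alt ns ms
instance (ns : Int × Int) (ms : Int × Int) (out : List Int × List Int) : Decidable (Spec_diff_parity_bits ns ms out) := by unfold Spec_diff_parity_bits; infer_instance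

-- ===== CLAIM (what is proved, stated in full; the proofs are below) =====
def Claim_equal_diff_parity_bits : Prop := ∀ (ns : Int × Int) (ms : Int × Int), Dom_diff_parity_bits ns ms → Spec_diff_parity_bits ns ms (diff_parity_bits ns ms)

-- ===== LEMMAS AND PROOFS =====

lemma pvSubAnd (m n : Nat) : m - (m &&& n) = Nat.ldiff m n := by
  have hld : ∀ a b : Bool, Nat.ldiff a.toNat b.toNat = (a && !b).toNat := by
    intro a b
    apply Nat.eq_of_testBit_eq
    intro i
    rw [Nat.testBit_ldiff, Nat.testBit_bool_toNat, Nat.testBit_bool_toNat,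
      Nat.testBit_bool_toNat]
    cases a <;> cases b <;> simp
  induction m using Nat.strong_induction_on generalizing n with
  | _ m ih =>
    rcases Nat.eq_zero_or_pos m with hm | hm
    · subst hm
      have h0 : Nat.ldiff 0 n = 0 := by
        apply Nat.eq_of_testBit_eq
        intro i
        rw [Nat.testBit_ldiff]
        simp
      simp [h0]
    · have hdiv : m / 2 < m := Nat.div_lt_self hm (by norm_num)
      have ihh := ih (m / 2) hdiv (n / 2)
      have hA : (m &&& n) / 2 = (m / 2) &&& (n / 2) := Nat.and_div_two
      have hA2 : (m &&& n) % 2 = (m % 2) &&& (n % 2) := by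
        have := Nat.and_mod_two_pow (a := m) (b := n) (n := 1)
        simpa using this
      have hL : (Nat.ldiff m n) / 2 = Nat.ldiff (m / 2) (n / 2) := by
        have := Nat.bitwise_div_two_pow (f := fun a b => a && !b) (x := m) (y := n) (n := 1)
        simpa [Nat.ldiff] using this
      have hL2 : (Nat.ldiff m n) % 2 = Nat.ldiff (m % 2) (n % 2) := by
        have := Nat.bitwise_mod_two_pow (f := fun a b => a && !b) (x := m) (y := n) (n := 1)
        simpa [Nat.ldiff] using this
      have hle : (m / 2) &&& (n / 2) ≤ m / 2 := Nat.and_le_left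
      have l00 : Nat.ldiff 0 0 = 0 := hld false false
      have l01 : Nat.ldiff 0 1 = 0 := hld false true
      have l10 : Nat.ldiff 1 0 = 1 := hld true false
      have l11 : Nat.ldiff 1 1 = 0 := hld true true
      rcases Nat.mod_two_eq_zero_or_one m with h1 | h1 <;>
        rcases Nat.mod_two_eq_zero_or_one n with h2 | h2 <;>
        · rw [h1, h2] at hA2 hL2
          simp only [show (0:Nat) &&& 0 = 0 from rfl, show (0:Nat) &&& 1 = 0 from rfl,
            show (1:Nat) &&& 0 = 0 from rfl, show (1:Nat) &&& 1 = 1 from rfl,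
            l00, l01, l10, l11] at hA2 hL2
          omega

lemma pvTestBit_band (a b : Int) (k : Nat) :
    (PySem.Int.band a b).testBit k = (a.testBit k && b.testBit k) := by
  cases a with
  | ofNat m =>
    cases b with
    | ofNat n =>
      simp [PySem.Int.band, Int.testBit, Nat.testBit_and]
    | negSucc n =>
      have e : PySem.Int.band (Int.ofNat m) (Int.negSucc n) = ((m - (m &&& n) : Nat) : Int) := by
        simp [PySem.Int.band, Int.negSucc_eq]
        intro h
        exact absurd h (by omega)
      rw [e, pvSubAnd]
      simp [Int.testBit, Nat.testBit_ldiff]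
  | negSucc m =>
    cases b with
    | ofNat n =>
      have e : PySem.Int.band (Int.negSucc m) (Int.ofNat n) = ((n - (n &&& m) : Nat) : Int) := by
        simp [PySem.Int.band, Int.negSucc_eq]
        intro h
        exact absurd h (by omega)
      rw [e, pvSubAnd]
      simp [Int.testBit, Nat.testBit_ldiff, Bool.and_comm]
    | negSucc n =>
      have e : PySem.Int.band (Int.negSucc m) (Int.negSucc n) = Int.negSucc (m ||| n) := by
        simp [PySem.Int.band, Int.negSucc_eq]
        omega
      rw [e]
      simp [Int.testBit, Nat.testBit_or]

lemma pvNegSuccForm (x : Nat) : -(x : Int) - 1 = Int.negSucc x := by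
  rw [Int.negSucc_eq]; ring

lemma pvTestBit_bor (a b : Int) (k : Nat) :
    (PySem.Int.bor a b).testBit k = (a.testBit k || b.testBit k) := by
  cases a with
  | ofNat m =>
    cases b with
    | ofNat n =>
      simp [PySem.Int.bor, Int.testBit, Nat.testBit_or]
    | negSucc n =>
      have e : PySem.Int.bor (Int.ofNat m) (Int.negSucc n) = -(((n - (n &&& m) : Nat) : Int)) - 1 := by
        simp [PySem.Int.bor, Int.negSucc_eq]
        intro h
        exact absurd h (by omega)
      rw [e, pvSubAnd, pvNegSuccForm]
      simp [Int.testBit, Nat.testBit_ldiff, Bool.or_comm]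
  | negSucc m =>
    cases b with
    | ofNat n =>
      have e : PySem.Int.bor (Int.negSucc m) (Int.ofNat n) = -(((m - (m &&& n) : Nat) : Int)) - 1 := by
        simp [PySem.Int.bor, Int.negSucc_eq]
        intro h
        exact absurd h (by omega)
      rw [e, pvSubAnd, pvNegSuccForm]
      simp [Int.testBit, Nat.testBit_ldiff]
    | negSucc n =>
      have e : PySem.Int.bor (Int.negSucc m) (Int.negSucc n) = -(((m &&& n : Nat) : Int)) - 1 := by
        simp [PySem.Int.bor, Int.negSucc_eq]
        omega
      rw [e, pvNegSuccForm]
      simp [Int.testBit, Nat.testBit_and]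

lemma pvTestBit_bxor (a b : Int) (k : Nat) :
    (PySem.Int.bxor a b).testBit k = (a.testBit k ^^ b.testBit k) := by
  cases a with
  | ofNat m =>
    cases b with
    | ofNat n =>
      simp [PySem.Int.bxor, Int.testBit, Nat.testBit_xor]
    | negSucc n =>
      have e : PySem.Int.bxor (Int.ofNat m) (Int.negSucc n) = -(((m ^^^ n : Nat) : Int)) - 1 := by
        simp [PySem.Int.bxor, Int.negSucc_eq]
        intro h
        exact absurd h (by omega)
      rw [e, pvNegSuccForm]
      simp [Int.testBit, Nat.testBit_xor]
  | negSucc m =>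
    cases b with
    | ofNat n =>
      have e : PySem.Int.bxor (Int.negSucc m) (Int.ofNat n) = -(((m ^^^ n : Nat) : Int)) - 1 := by
        simp [PySem.Int.bxor, Int.negSucc_eq]
        intro h
        exact absurd h (by omega)
      rw [e, pvNegSuccForm]
      simp [Int.testBit, Nat.testBit_xor]
    | negSucc n =>
      have e : PySem.Int.bxor (Int.negSucc m) (Int.negSucc n) = ((m ^^^ n : Nat) : Int) := by
        simp [PySem.Int.bxor, Int.negSucc_eq]
        omega
      rw [e]
      simp [Int.testBit, Nat.testBit_xor]

lemma pvOneShl (i : Nat) : (1 : Int) <<< i = ((2 ^ i : Nat) : Int) := by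
  have : (1 : Int) <<< i = ((1 <<< i : Nat) : Int) := rfl
  rw [this, Nat.shiftLeft_eq, one_mul]

lemma pvBand_two_pow (x : Int) (i : Nat) :
    PySem.Int.band x ((2 ^ i : Nat) : Int) = if x.testBit i then ((2 ^ i : Nat) : Int) else 0 := by
  cases x with
  | ofNat m =>
    simp only [PySem.Int.band]
    rw [if_pos (show (0:Int) ≤ Int.ofNat m from Int.natCast_nonneg m), if_pos (show (0:Int) ≤ ((2^i:Nat):Int) from Int.natCast_nonneg _)]
    show ((m &&& 2 ^ i : Nat) : Int) = _
    rw [Nat.and_two_pow]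
    cases h : m.testBit i <;> simp [Int.testBit, h]
  | negSucc m =>
    simp only [PySem.Int.band]
    rw [if_neg (Int.not_le.mpr (Int.negSucc_lt_zero m)), if_pos (show (0:Int) ≤ ((2^i:Nat):Int) from Int.natCast_nonneg _)]
    rw [show -Int.negSucc m - 1 = (m : Int) by rw [Int.negSucc_eq]; ring,
      Int.toNat_natCast, Int.toNat_natCast]
    rw [show 2 ^ i &&& m = m &&& 2 ^ i from Nat.and_comm _ _, Nat.and_two_pow]
    cases h : m.testBit i <;> simp [Int.testBit, h]

lemma pvBand_two_pow_eq_iff (x y : Int) (i : Nat) :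
    PySem.Int.band x ((2 ^ i : Nat) : Int) = PySem.Int.band y ((2 ^ i : Nat) : Int) ↔
      x.testBit i = y.testBit i := by
  rw [pvBand_two_pow, pvBand_two_pow]
  rcases hx : x.testBit i <;> rcases hy : y.testBit i <;> simp
  exact Ne.symm (by positivity)

lemma pvSet2 (x y : Int) : (1 < (PySem.Set.ofList [x, y]).length) ↔ ¬ (y = x) := by
  by_cases h : y = x <;>
    simp [PySem.Set.ofList, PySem.Set.add, PySem.Set.contains, h]

lemma pvSet4 (x y z w : Int) :
    (1 < (PySem.Set.ofList [x, y, z, w]).length) ↔ ¬ (y = x ∧ z = x ∧ w = x) := by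
  by_cases hy : y = x <;> by_cases hz : z = x <;> by_cases hw : w = x <;>
    simp [PySem.Set.ofList, PySem.Set.add, PySem.Set.contains, hy, hz, hw] <;>
    split_ifs <;> simp

lemma pvFoldPair (P Q : Int → Prop) [DecidablePred P] [DecidablePred Q]
    (l : List Int) (acc : List Int × List Int) :
    l.foldl (fun st i => (if P i then st.1 ++ [i] else st.1, if Q i then st.2 ++ [i] else st.2)) acc
      = (acc.1 ++ l.filter (fun i => decide (P i)), acc.2 ++ l.filter (fun i => decide (Q i))) := by
  induction l generalizing acc with
  | nil => simp
  | cons x xs ih =>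
    simp only [List.foldl_cons, ih, List.filter_cons]
    split_ifs <;> simp_all

lemma pvBitIndicesFuel_eq (k : Nat) : ∀ (fuel m : Nat), m < 2 ^ k → m ≤ fuel → ∀ (o : Int),
    pvBitIndicesFuel fuel m o
      = List.map (fun j : Nat => o + (j : Int)) (List.filter (fun j => m.testBit j) (List.range k)) := by
  induction k with
  | zero =>
    intro fuel m hm _ o
    interval_cases m
    cases fuel <;> simp [pvBitIndicesFuel]
  | succ k ih =>
    intro fuel m hm hf o
    rcases Nat.eq_zero_or_pos m with h0 | h0
    · subst h0
      cases fuel <;> simp [pvBitIndicesFuel, Nat.zero_testBit]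
    · cases fuel with
      | zero => omega
      | succ fuel =>
        have hm2 : m / 2 < 2 ^ k := by
          rw [Nat.pow_succ] at hm
          omega
        have ihh := ih fuel (m / 2) hm2 (by omega) (o + 1)
        rw [pvBitIndicesFuel, if_neg (by omega), Nat.shiftRight_one, ihh,
          List.range_succ_eq_map, List.filter_cons, List.filter_map]
        have hq : List.filter ((fun j => m.testBit j) ∘ Nat.succ) (List.range k)
            = List.filter (fun j => (m / 2).testBit j) (List.range k) := by
          apply List.filter_congr
          intro j _
          simp [Function.comp, Nat.testBit_add_one]
        have hmap : List.map (fun j : Nat => o + (j : Int))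
              (List.map Nat.succ (List.filter (fun j => (m / 2).testBit j) (List.range k)))
            = List.map (fun j : Nat => o + 1 + (j : Int))
              (List.filter (fun j => (m / 2).testBit j) (List.range k)) := by
          rw [List.map_map]
          apply List.map_congr_left
          intro j _
          simp [Function.comp]
          ring
        by_cases hpar : m % 2 = 1
        · rw [if_pos (by simp [hpar]), if_pos (by simp [hpar])]
          rw [List.map_cons, hq, hmap]
          simp
        · rw [if_neg (by simp [hpar]), if_neg (by simp [hpar])]
          rw [hq, hmap]
          simp

lemma pvBitIndices_eq (k : Nat) (m : Nat) (hm : m < 2 ^ k) (o : Int) :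
    pvBitIndices m o
      = List.map (fun j : Nat => o + (j : Int)) (List.filter (fun j => m.testBit j) (List.range k)) :=
  pvBitIndicesFuel_eq k m m hm le_rfl o


lemma pvCastTestBit (n j : Nat) : ((n : Int)).testBit j = n.testBit j := rfl

lemma pvToNatTestBit (x : Int) (hx : 0 ≤ x) (j : Nat) : x.toNat.testBit j = x.testBit j := by
  cases x with
  | ofNat m => rfl
  | negSucc m => exact absurd hx (Int.not_le.mpr (Int.negSucc_lt_zero m))

lemma pvLimTestBit (L j : Nat) : ((1 : Int) <<< L - 1).testBit j = decide (j < L) := by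
  have h2 : 1 ≤ 2 ^ L := Nat.one_le_two_pow
  have h1 : (1 : Int) <<< L - 1 = ((2 ^ L - 1 : Nat) : Int) := by
    rw [pvOneShl]
    push_cast [h2]
    ring
  rw [h1, pvCastTestBit, Nat.testBit_two_pow_sub_one]

lemma pvBoolP (ta tb tc td : Bool) :
    decide (¬ tb = ta ∧ ¬ td = tc) = ((ta ^^ tb) && (tc ^^ td)) := by
  cases ta <;> cases tb <;> cases tc <;> cases td <;> decide

lemma pvBoolD (ta tb tc td : Bool) :
    decide (¬ (tb = ta ∧ tc = ta ∧ td = ta))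
      = ((ta || tb || tc || td) ^^ (ta && tb && tc && td)) := by
  cases ta <;> cases tb <;> cases tc <;> cases td <;> decide

-- one side of the result: A's filtered range = B's set-bit walk of the mask X
lemma pvSideEq (L : Nat) (X : Int) (P : Int → Prop) [DecidablePred P]
    (hX : 0 ≤ X)
    (hbits : ∀ j : Nat, X.testBit j = (decide (P (j : Int)) && decide (j < L))) :
    List.filter (fun i => decide (P i)) (PySem.List.pyRange 0 (L : Int))
      = pvBitIndices X.toNat 0 := by
  have htN : ∀ j : Nat, X.toNat.testBit j = X.testBit j := pvToNatTestBit X hX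
  have hlt : X.toNat < 2 ^ L := by
    apply Nat.lt_pow_two_of_testBit
    intro i hi
    rw [htN i, hbits i]
    simp [Nat.not_lt.mpr hi]
  rw [pvBitIndices_eq L X.toNat hlt 0]
  rw [PySem.List.pyRange_zero_natCast, List.filter_map]
  have hpt : ∀ j ∈ List.range L,
      ((fun i => decide (P i)) ∘ (fun k : Nat => (k : Int))) j
        = (fun j : Nat => X.toNat.testBit j) j := by
    intro j hj
    simp only [Function.comp]
    rw [htN j, hbits j]
    simp [List.mem_range.mp hj]
  rw [List.filter_congr hpt]
  apply List.map_congr_left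
  intro j _
  simp

-- ===== VERDICT (by name: the statement is the Claim_ definition above) =====
theorem diff_parity_bits_spec : Claim_equal_diff_parity_bits := by
  intro ns ms _
  unfold Spec_diff_parity_bits
  obtain ⟨a, b⟩ := ns
  obtain ⟨c, d⟩ := ms
  simp only [diff_parity_bits, diff_parity_bits_alt]
  rw [pvFoldPair]
  set L := PySem.Int.bitLength (max (max a b) (max c d)) with hLdef
  set lim : Int := (1 : Int) <<< L - 1 with hlimdef
  have hlimtb : ∀ j : Nat, lim.testBit j = decide (j < L) := fun j => pvLimTestBit L j
  have hlimnn : (0 : Int) ≤ lim := by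
    have h2 : (1 : Int) ≤ ((2 ^ L : Nat) : Int) := by exact_mod_cast Nat.one_le_two_pow
    rw [hlimdef, pvOneShl]
    omega
  have hnn : ∀ y : Int, (0 : Int) ≤ PySem.Int.band y lim := by
    intro y
    rw [PySem.Int.band_comm]
    exact PySem.Int.band_nonneg_of_nonneg_left y hlimnn
  simp only [List.nil_append]
  refine Prod.ext ?_ ?_
  · -- diffs component
    apply pvSideEq L _ _ (hnn _)
    intro j
    rw [pvTestBit_band, hlimtb j]
    rw [pvTestBit_bxor, pvTestBit_bor, pvTestBit_bor, pvTestBit_bor,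
      pvTestBit_band, pvTestBit_band, pvTestBit_band]
    congr 1
    rw [show ((j : Int)).toNat = j from Int.toNat_natCast j,
      show ((1 <<< j : Nat) : Int) = ((2 ^ j : Nat) : Int) by rw [Nat.shiftLeft_eq, one_mul]]
    rw [decide_eq_decide.mpr (pvSet4 _ _ _ _)]
    rw [decide_eq_decide.mpr (by
      rw [pvBand_two_pow_eq_iff, pvBand_two_pow_eq_iff, pvBand_two_pow_eq_iff] :
        (¬ (PySem.Int.band b ((2 ^ j : Nat) : Int) = PySem.Int.band a ((2 ^ j : Nat) : Int)
            ∧ PySem.Int.band c ((2 ^ j : Nat) : Int) = PySem.Int.band a ((2 ^ j : Nat) : Int)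
            ∧ PySem.Int.band d ((2 ^ j : Nat) : Int) = PySem.Int.band a ((2 ^ j : Nat) : Int)))
          ↔ ¬ (b.testBit j = a.testBit j ∧ c.testBit j = a.testBit j ∧ d.testBit j = a.testBit j))]
    exact (pvBoolD (a.testBit j) (b.testBit j) (c.testBit j) (d.testBit j)).symm
    infer_instance
  · -- parity component
    apply pvSideEq L _ _ (hnn _)
    intro j
    rw [pvTestBit_band, hlimtb j]
    rw [pvTestBit_band, pvTestBit_bxor, pvTestBit_bxor]
    congr 1
    rw [show ((j : Int)).toNat = j from Int.toNat_natCast j,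
      show ((1 <<< j : Nat) : Int) = ((2 ^ j : Nat) : Int) by rw [Nat.shiftLeft_eq, one_mul]]
    rw [decide_eq_decide.mpr (and_congr (pvSet2 _ _) (pvSet2 _ _))]
    rw [decide_eq_decide.mpr (by
      rw [pvBand_two_pow_eq_iff, pvBand_two_pow_eq_iff] :
        (¬ PySem.Int.band b ((2 ^ j : Nat) : Int) = PySem.Int.band a ((2 ^ j : Nat) : Int)
            ∧ ¬ PySem.Int.band d ((2 ^ j : Nat) : Int) = PySem.Int.band c ((2 ^ j : Nat) : Int))
          ↔ (¬ b.testBit j = a.testBit j ∧ ¬ d.testBit j = c.testBit j))]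
    exact (pvBoolP (a.testBit j) (b.testBit j) (c.testBit j) (d.testBit j)).symm
    infer_instance
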